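-- pv_equiv track=rewrite | github.com/szymon240/imo-lab3 | local_search.py | is_edge_in_cycles
-- ===== SOURCE A (Python) =====
-- def is_edge_in_cycles(edge, cycles):
--     for cycle in cycles:
--         for i in range(len(cycle) - 1):
--             if (cycle[i], cycle[i + 1]) == edge:
--                 return 1  # taki sam kierunek
--             if (cycle[i + 1], cycle[i]) == edge:
--                 return -1  # odwrotny kierunek
--     return 0  # brak krawędzi
-- ===== SOURCE B (Python) =====
-- def is_edge_in_cycles(edge, cycles):
--     index = {}
--     for cycle in cycles:
--         for u, v in zip(cycle, cycle[1:]):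
--             index.setdefault((u, v), 1)
--             index.setdefault((v, u), -1)
--     return index.get(edge, 0)
-- ===== Notes on version B (the rewrite author's own statement) =====
-- stated objective: alternative
-- what changed: Replaces the early-exit double scan with a single index-building pass (setdefault keeps the first occurrence of each directed edge, forward before backward) followed by one dictionary lookup.
import Mathlib
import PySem

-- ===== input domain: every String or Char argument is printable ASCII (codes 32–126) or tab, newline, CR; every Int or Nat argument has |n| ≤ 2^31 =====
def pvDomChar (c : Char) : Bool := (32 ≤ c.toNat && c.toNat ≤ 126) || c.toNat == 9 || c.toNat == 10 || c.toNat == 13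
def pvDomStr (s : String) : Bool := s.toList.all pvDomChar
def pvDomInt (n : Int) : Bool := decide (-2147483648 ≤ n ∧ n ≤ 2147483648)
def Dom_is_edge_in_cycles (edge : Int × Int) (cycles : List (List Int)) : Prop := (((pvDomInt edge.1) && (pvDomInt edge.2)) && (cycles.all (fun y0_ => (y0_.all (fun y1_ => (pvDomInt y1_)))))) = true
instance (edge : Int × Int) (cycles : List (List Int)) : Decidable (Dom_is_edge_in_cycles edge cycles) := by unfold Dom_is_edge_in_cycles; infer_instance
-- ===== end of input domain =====

-- B replaces A's early-exit scan with one index-building pass (first occurrence wins) plus a single lookup; alternative structure, same cost.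


-- ===== PORT A =====
-- inner loop 'for i in range(len(cycle)-1)': structural recursion over the adjacent pairs of the cycle,
-- early return as Option (some 1 / some -1 = returned, none = loop finished without returning)
def scanCycleA (edge : Int × Int) : List Int → Option Int
  | a :: b :: rest =>
    if (a, b) = edge then some 1
    else if (b, a) = edge then some (-1)
    else scanCycleA edge (b :: rest)
  | _ => none

def is_edge_in_cycles (edge : Int × Int) (cycles : List (List Int)) : Int :=
  match cycles with
  | [] => 0
  | c :: rest =>
    match scanCycleA edge c with
    | some v => v
    | none => is_edge_in_cycles edge rest

-- ===== PORT B =====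
-- index.setdefault((u,v), 1); index.setdefault((v,u), -1) over zip(cycle, cycle[1:])
def addCycleB (d : PySem.Dict (Int × Int) Int) : List Int → PySem.Dict (Int × Int) Int
  | u :: v :: rest => addCycleB ((d.setdefault (u, v) 1).setdefault (v, u) (-1)) (v :: rest)
  | _ => d

def is_edge_in_cycles_alt (edge : Int × Int) (cycles : List (List Int)) : Int :=
  (cycles.foldl addCycleB PySem.Dict.empty).getD edge 0

-- ===== PRECONDITION & SPEC =====
def Spec_is_edge_in_cycles (edge : Int × Int) (cycles : List (List Int)) (out : Int) : Prop := out = is_edge_in_cycles_alt edge cycles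
instance (edge : Int × Int) (cycles : List (List Int)) (out : Int) : Decidable (Spec_is_edge_in_cycles edge cycles out) := by unfold Spec_is_edge_in_cycles; infer_instance

-- ===== CLAIM (what is proved, stated in full; the proofs are below) =====
def Claim_equal_is_edge_in_cycles : Prop := ∀ (edge : Int × Int) (cycles : List (List Int)), Dom_is_edge_in_cycles edge cycles → Spec_is_edge_in_cycles edge cycles (is_edge_in_cycles edge cycles)

-- ===== LEMMAS AND PROOFS =====

-- A's outer loop as an Option (first returned value, none if no return)
def scanAllA (edge : Int × Int) : List (List Int) → Option Int
  | [] => none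
  | c :: rest => (scanCycleA edge c).or (scanAllA edge rest)

-- lookup at the setdefault'ed key itself: the old binding wins over the new value
lemma get?_setdefault_self' {κ ν : Type} [BEq κ] [LawfulBEq κ] (d : PySem.Dict κ ν) (k : κ) (v : ν) :
    (d.setdefault k v).get? k = (d.get? k).or (some v) := by
  cases h : d.get? k with
  | none =>
    rw [PySem.Dict.setdefault_of_not_contains d v
        (by rw [PySem.Dict.contains_eq_isSome_get?, h]; rfl),
      PySem.Dict.get?_insert_self]
    rfl
  | some w =>
    rw [PySem.Dict.setdefault_of_contains d v
        (by rw [PySem.Dict.contains_eq_isSome_get?, h]; rfl), h]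
    rfl

lemma get?_addCycleB (edge : Int × Int) (c : List Int) :
    ∀ d : PySem.Dict (Int × Int) Int,
      (addCycleB d c).get? edge = (d.get? edge).or (scanCycleA edge c) := by
  induction c with
  | nil => intro d; simp [addCycleB, scanCycleA]
  | cons u t ih =>
    intro d
    match t with
    | [] => simp [addCycleB, scanCycleA]
    | v :: rest =>
      rw [addCycleB, ih, scanCycleA]
      by_cases h1 : edge = (u, v)
      · subst h1
        by_cases h2 : ((u, v) : Int × Int) = (v, u)
        · rw [Prod.mk.injEq] at h2
          obtain ⟨hu, -⟩ := h2
          subst hu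
          rw [get?_setdefault_self', get?_setdefault_self']
          cases d.get? (u, u) <;> simp [Option.or]
        · rw [PySem.Dict.get?_setdefault_of_ne _ _ h2, get?_setdefault_self']
          cases d.get? (u, v) <;> simp [Option.or]
      · by_cases h2 : edge = (v, u)
        · subst h2
          rw [get?_setdefault_self', PySem.Dict.get?_setdefault_of_ne _ _ h1]
          rw [if_neg (fun h => h1 h.symm), if_pos rfl]
          cases d.get? (v, u) <;> simp [Option.or]
        · rw [PySem.Dict.get?_setdefault_of_ne _ _ h2,
            PySem.Dict.get?_setdefault_of_ne _ _ h1,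
            if_neg (fun h => h1 h.symm), if_neg (fun h => h2 h.symm)]

lemma get?_foldl_addCycleB (edge : Int × Int) (cycles : List (List Int)) :
    ∀ d : PySem.Dict (Int × Int) Int,
      (cycles.foldl addCycleB d).get? edge = (d.get? edge).or (scanAllA edge cycles) := by
  induction cycles with
  | nil => intro d; simp [scanAllA]
  | cons c rest ih =>
    intro d
    rw [List.foldl_cons, ih, get?_addCycleB, scanAllA, Option.or_assoc]

lemma is_edge_in_cycles_eq_scanAllA (edge : Int × Int) (cycles : List (List Int)) :
    is_edge_in_cycles edge cycles = (scanAllA edge cycles).getD 0 := by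
  induction cycles with
  | nil => rfl
  | cons c rest ih =>
    rw [is_edge_in_cycles, scanAllA]
    cases h : scanCycleA edge c <;> simp [Option.or, ih]

-- ===== VERDICT (by name: the statement is the Claim_ definition above) =====
theorem is_edge_in_cycles_spec : Claim_equal_is_edge_in_cycles := by
  intro edge cycles _
  unfold Spec_is_edge_in_cycles is_edge_in_cycles_alt
  rw [PySem.Dict.getD_eq_get?_getD, get?_foldl_addCycleB, is_edge_in_cycles_eq_scanAllA]
  simp [PySem.Dict.get?_empty, Option.or]
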